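-- pv_equiv track=rewrite | github.com/Japesh285/SIte_scrapper | app/scrapers/dynamic_api.py | is_job_object
-- ===== SOURCE A (Python) =====
-- _TITLE_KEYS = [
--     "title", "jobTitle", "job_title", "requisitionTitle", "positionTitle",
--     "name", "postingTitle", "jobTitleText", "roleTitle",
-- ]
--
-- _JOB_SPECIFIC_KEYS = [
--     "title", "jobTitle", "job_title", "requisitionTitle", "positionTitle",
--     "postingTitle", "roleTitle", "jobTitleText",
--     "jobId", "job_id", "requisitionId", "postingId", "requisition_id",
--     "jobCode", "apply", "apply_url", "applyUrl", "applyLink",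
--     "jobUrl", "detailUrl", "externalUrl", "postingUrl",
--     "department", "employment_type", "employmentType",
--     "posted_date", "datePosted", "postedOn",
--     "jobDescription", "description", "summary",
--     "experience", "yearsOfExperience", "seniority",
--     "skills", "required_skills", "qualifications",
-- ]
--
-- def is_job_object(obj: dict) -> bool:
--     """Return TRUE if object contains at least 2 of these job-specific signals:
--     - title variant (title, jobTitle, positionTitle, etc.)
--     - location variant (location, locations, city, workLocation, etc.)
--     - job ID variant (jobId, requisitionId, postingId — NOT bare "id")
--     - job URL/apply variant (jobUrl, applyUrl, detailUrl, etc.)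
--     - job metadata variant (department, employment_type, posted_date, skills, etc.)
--
--     Rejects generic dicts like {"id": 123, "name": "Gurugram"}.
--     """
--     keys = set(obj.keys())
--     keys_lower = {k.lower() for k in keys}
--
--     has_title = bool(keys & set(_TITLE_KEYS))
--     has_location = bool(keys & {"location", "locations", "primaryLocation", "workLocation",
--                                  "locationText", "locationsText", "city", "addressLocality"})
--     has_job_id = bool(keys & {"jobId", "job_id", "requisitionId", "postingId",
--                                "requisition_id", "jobCode", "externalId", "externalPath"})
--     has_job_url = bool(keys & {"url", "job_url", "link", "href", "apply_url", "applyUrl",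
--                                 "detailUrl", "jobUrl", "externalUrl", "redirectUrl", "applyLink",
--                                 "postingUrl"})
--     has_job_meta = bool(keys_lower & {k.lower() for k in _JOB_SPECIFIC_KEYS})
--
--     score = sum([has_title, has_location, has_job_id, has_job_url, has_job_meta])
--     return score >= 2
-- ===== SOURCE B (Python) =====
-- _TITLE_KEYS = [
--     "title", "jobTitle", "job_title", "requisitionTitle", "positionTitle",
--     "name", "postingTitle", "jobTitleText", "roleTitle",
-- ]
--
-- _JOB_SPECIFIC_KEYS = [
--     "title", "jobTitle", "job_title", "requisitionTitle", "positionTitle",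
--     "postingTitle", "roleTitle", "jobTitleText",
--     "jobId", "job_id", "requisitionId", "postingId", "requisition_id",
--     "jobCode", "apply", "apply_url", "applyUrl", "applyLink",
--     "jobUrl", "detailUrl", "externalUrl", "postingUrl",
--     "department", "employment_type", "employmentType",
--     "posted_date", "datePosted", "postedOn",
--     "jobDescription", "description", "summary",
--     "experience", "yearsOfExperience", "seniority",
--     "skills", "required_skills", "qualifications",
-- ]
--
-- _LOC_KEYS = ["location", "locations", "primaryLocation", "workLocation",
--              "locationText", "locationsText", "city", "addressLocality"]
-- _ID_KEYS = ["jobId", "job_id", "requisitionId", "postingId",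
--             "requisition_id", "jobCode", "externalId", "externalPath"]
-- _URL_KEYS = ["url", "job_url", "link", "href", "apply_url", "applyUrl",
--              "detailUrl", "jobUrl", "externalUrl", "redirectUrl", "applyLink",
--              "postingUrl"]
--
-- # Inverted index: exact-case key -> bitmask of categories (bit0 title, bit1 location,
-- # bit2 job id, bit3 job url); lowercased key -> bit4 (job metadata).
-- _KEY_BITS = {}
-- for _k in _TITLE_KEYS:
--     _KEY_BITS[_k] = _KEY_BITS.get(_k, 0) | 1
-- for _k in _LOC_KEYS:
--     _KEY_BITS[_k] = _KEY_BITS.get(_k, 0) | 2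
-- for _k in _ID_KEYS:
--     _KEY_BITS[_k] = _KEY_BITS.get(_k, 0) | 4
-- for _k in _URL_KEYS:
--     _KEY_BITS[_k] = _KEY_BITS.get(_k, 0) | 8
--
-- _META_BITS = {}
-- for _k in _JOB_SPECIFIC_KEYS:
--     _META_BITS[_k.lower()] = 16
--
--
-- def is_job_object(obj: dict) -> bool:
--     # OR together the category bitmasks of all keys, then count the set bits.
--     mask = 0
--     for k in obj:
--         mask |= _KEY_BITS.get(k, 0) | _META_BITS.get(k.lower(), 0)
--     count = (mask & 1) + ((mask >> 1) & 1) + ((mask >> 2) & 1) + ((mask >> 3) & 1) + ((mask >> 4) & 1)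
--     return count >= 2
-- ===== Notes on version B (the rewrite author's own statement) =====
-- stated objective: alternative
-- what changed: Replaces A's five per-category set intersections by a precomputed inverted index (dict mapping each signal key to a category bitmask, lowercased keys for the metadata category), a single OR-fold of the masks over the object's keys, and a popcount >= 2 test.
import Mathlib
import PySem

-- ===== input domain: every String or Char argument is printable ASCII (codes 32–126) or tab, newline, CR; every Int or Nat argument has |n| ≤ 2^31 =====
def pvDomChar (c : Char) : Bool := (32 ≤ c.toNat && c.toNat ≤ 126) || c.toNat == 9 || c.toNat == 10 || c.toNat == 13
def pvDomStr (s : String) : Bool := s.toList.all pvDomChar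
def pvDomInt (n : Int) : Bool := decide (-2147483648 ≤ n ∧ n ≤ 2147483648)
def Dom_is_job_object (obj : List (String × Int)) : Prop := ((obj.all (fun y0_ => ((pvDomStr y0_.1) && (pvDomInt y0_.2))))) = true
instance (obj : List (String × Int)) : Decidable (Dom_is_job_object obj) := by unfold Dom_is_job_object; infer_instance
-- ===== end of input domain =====

-- B replaces A's five set intersections by a precomputed inverted index (key -> category
-- bitmask) folded with OR over the keys, then a popcount; same cost, different data structure.

-- module constants shared by both Pythons
def pvTitleKeys : List String :=
  ["title", "jobTitle", "job_title", "requisitionTitle", "positionTitle",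
   "name", "postingTitle", "jobTitleText", "roleTitle"]

def pvJobSpecificKeys : List String :=
  ["title", "jobTitle", "job_title", "requisitionTitle", "positionTitle",
   "postingTitle", "roleTitle", "jobTitleText",
   "jobId", "job_id", "requisitionId", "postingId", "requisition_id",
   "jobCode", "apply", "apply_url", "applyUrl", "applyLink",
   "jobUrl", "detailUrl", "externalUrl", "postingUrl",
   "department", "employment_type", "employmentType",
   "posted_date", "datePosted", "postedOn",
   "jobDescription", "description", "summary",
   "experience", "yearsOfExperience", "seniority",
   "skills", "required_skills", "qualifications"]

def pvLocKeys : List String :=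
  ["location", "locations", "primaryLocation", "workLocation",
   "locationText", "locationsText", "city", "addressLocality"]

def pvIdKeys : List String :=
  ["jobId", "job_id", "requisitionId", "postingId",
   "requisition_id", "jobCode", "externalId", "externalPath"]

def pvUrlKeys : List String :=
  ["url", "job_url", "link", "href", "apply_url", "applyUrl",
   "detailUrl", "jobUrl", "externalUrl", "redirectUrl", "applyLink",
   "postingUrl"]

-- ===== PORT A =====
def is_job_object (obj : List (String × Int)) : Bool :=
  let keys : PySem.Set String := PySem.Set.ofList (obj.map Prod.fst)
  let keys_lower : PySem.Set String := PySem.Set.ofList (keys.map PySem.Str.lower)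
  let has_title := !(PySem.Set.inter keys (PySem.Set.ofList pvTitleKeys)).isEmpty
  let has_location := !(PySem.Set.inter keys (PySem.Set.ofList pvLocKeys)).isEmpty
  let has_job_id := !(PySem.Set.inter keys (PySem.Set.ofList pvIdKeys)).isEmpty
  let has_job_url := !(PySem.Set.inter keys (PySem.Set.ofList pvUrlKeys)).isEmpty
  let has_job_meta :=
    !(PySem.Set.inter keys_lower (PySem.Set.ofList (pvJobSpecificKeys.map PySem.Str.lower))).isEmpty
  let score := has_title.toNat + has_location.toNat + has_job_id.toNat + has_job_url.toNat + has_job_meta.toNat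
  decide (2 ≤ score)

-- ===== PORT B =====
-- the module-level dicts of Source B: masks are nonnegative Python ints, kept as Nat so that
-- |, &, >> are Lean's exact counterparts of Python's bitwise operators on nonnegative ints
def pvKeyBits : PySem.Dict String Nat :=
  let d := pvTitleKeys.foldl (fun d k => d.insert k (d.getD k 0 ||| 1)) PySem.Dict.empty
  let d := pvLocKeys.foldl (fun d k => d.insert k (d.getD k 0 ||| 2)) d
  let d := pvIdKeys.foldl (fun d k => d.insert k (d.getD k 0 ||| 4)) d
  pvUrlKeys.foldl (fun d k => d.insert k (d.getD k 0 ||| 8)) d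

def pvMetaBits : PySem.Dict String Nat :=
  pvJobSpecificKeys.foldl (fun d k => d.insert (PySem.Str.lower k) 16) PySem.Dict.empty

def is_job_object_alt (obj : List (String × Int)) : Bool :=
  let mask := (obj.map Prod.fst).foldl
    (fun m k => m ||| (pvKeyBits.getD k 0 ||| pvMetaBits.getD (PySem.Str.lower k) 0)) 0
  let count := (mask &&& 1) + ((mask >>> 1) &&& 1) + ((mask >>> 2) &&& 1)
    + ((mask >>> 3) &&& 1) + ((mask >>> 4) &&& 1)
  decide (2 ≤ count)

-- ===== PRECONDITION & SPEC =====
def Spec_is_job_object (obj : List (String × Int)) (out : Bool) : Prop := out = is_job_object_alt obj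
instance (obj : List (String × Int)) (out : Bool) : Decidable (Spec_is_job_object obj out) := by unfold Spec_is_job_object; infer_instance

-- ===== CLAIM =====
def Claim_equal_is_job_object : Prop := ∀ (obj : List (String × Int)), Dom_is_job_object obj → Spec_is_job_object obj (is_job_object obj)

-- ===== LEMMAS AND PROOFS =====

-- bool(keys & S) = some key of l is in S
theorem pv_bool_inter (l s : List String) :
    (!(PySem.Set.inter (PySem.Set.ofList l) s).isEmpty)
      = l.any (fun k => PySem.Set.contains s k) := by
  rw [Bool.eq_iff_iff]
  simp [List.eq_nil_iff_forall_not_mem, PySem.Set.mem_inter, PySem.Set.mem_ofList,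
    List.any_eq_true]

-- any over the deduplicated key set = any over the raw key list
theorem pv_any_ofList (l : List String) (p : String → Bool) :
    (PySem.Set.ofList l).any p = l.any p := by
  rw [Bool.eq_iff_iff]
  simp [List.any_eq_true, PySem.Set.mem_ofList]

-- x in set(l) = x in l
theorem pv_contains_ofList (l : List String) (k : String) :
    PySem.Set.contains (PySem.Set.ofList l) k = decide (k ∈ l) := by
  rw [Bool.eq_iff_iff]; simp [PySem.Set.contains, PySem.Set.mem_ofList]

-- lookup after Source B's '_KEY_BITS[k] = _KEY_BITS.get(k, 0) | c' loop
theorem pv_foldl_insert_or_getD (l : List String) (c : Nat) (d : PySem.Dict String Nat) (s : String) :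
    (l.foldl (fun d k => d.insert k (d.getD k 0 ||| c)) d).getD s 0
      = if s ∈ l then d.getD s 0 ||| c else d.getD s 0 := by
  induction l generalizing d with
  | nil => simp
  | cons k rest ih =>
    simp only [List.foldl_cons, ih, PySem.Dict.getD_insert, List.mem_cons]
    by_cases h1 : s ∈ rest <;> by_cases h2 : s = k <;> simp [h1, h2]

-- lookup after Source B's '_META_BITS[k.lower()] = 16' loop
theorem pv_foldl_insert_const_getD (l : List String) (d : PySem.Dict String Nat) (s : String) :
    (l.foldl (fun d k => d.insert (PySem.Str.lower k) 16) d).getD s 0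
      = if s ∈ l.map PySem.Str.lower then 16 else d.getD s 0 := by
  induction l generalizing d with
  | nil => simp
  | cons k rest ih =>
    simp only [List.foldl_cons, ih, PySem.Dict.getD_insert, List.map_cons, List.mem_cons]
    by_cases h1 : s ∈ rest.map PySem.Str.lower <;> by_cases h2 : s = PySem.Str.lower k <;>
      simp [h1, h2]

-- the per-key mask B's _KEY_BITS lookup computes, written through the four membership tests
def pvCatMask (k : String) : Nat :=
  (if k ∈ pvTitleKeys then 1 else 0) + (if k ∈ pvLocKeys then 2 else 0)
    + (if k ∈ pvIdKeys then 4 else 0) + (if k ∈ pvUrlKeys then 8 else 0)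

theorem pv_keyBits_getD (k : String) : pvKeyBits.getD k 0 = pvCatMask k := by
  unfold pvKeyBits pvCatMask
  simp only [pv_foldl_insert_or_getD, PySem.Dict.getD_empty]
  split_ifs <;> decide

theorem pv_metaBits_getD (s : String) :
    pvMetaBits.getD s 0 = if s ∈ pvJobSpecificKeys.map PySem.Str.lower then 16 else 0 := by
  unfold pvMetaBits
  simp only [pv_foldl_insert_const_getD, PySem.Dict.getD_empty]

-- the five bits of a per-key mask, one per category
theorem pv_mask_bits (p1 p2 p3 p4 p5 : Prop) [Decidable p1] [Decidable p2] [Decidable p3]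
    [Decidable p4] [Decidable p5] :
    (((if p1 then 1 else 0) + (if p2 then 2 else 0) + (if p3 then 4 else 0)
        + (if p4 then 8 else 0) ||| (if p5 then 16 else 0)).testBit 0 = decide p1)
    ∧ (((if p1 then 1 else 0) + (if p2 then 2 else 0) + (if p3 then 4 else 0)
        + (if p4 then 8 else 0) ||| (if p5 then 16 else 0)).testBit 1 = decide p2)
    ∧ (((if p1 then 1 else 0) + (if p2 then 2 else 0) + (if p3 then 4 else 0)
        + (if p4 then 8 else 0) ||| (if p5 then 16 else 0)).testBit 2 = decide p3)
    ∧ (((if p1 then 1 else 0) + (if p2 then 2 else 0) + (if p3 then 4 else 0)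
        + (if p4 then 8 else 0) ||| (if p5 then 16 else 0)).testBit 3 = decide p4)
    ∧ (((if p1 then 1 else 0) + (if p2 then 2 else 0) + (if p3 then 4 else 0)
        + (if p4 then 8 else 0) ||| (if p5 then 16 else 0)).testBit 4 = decide p5) := by
  by_cases h1 : p1 <;> by_cases h2 : p2 <;> by_cases h3 : p3 <;> by_cases h4 : p4 <;>
    by_cases h5 : p5 <;> simp [h1, h2, h3, h4, h5] <;> decide

-- bit i of a fold of ORs = some element contributes bit i
theorem pv_foldl_or_testBit (ks : List String) (g : String → Nat) (a : Nat) (i : Nat) :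
    (ks.foldl (fun m k => m ||| g k) a).testBit i
      = (a.testBit i || ks.any (fun k => (g k).testBit i)) := by
  induction ks generalizing a with
  | nil => simp
  | cons k rest ih =>
    simp [List.foldl_cons, ih, Nat.testBit_or, Bool.or_assoc]


-- m & 1 is bit 0
theorem pv_and_one (m : Nat) : m &&& 1 = (m.testBit 0).toNat := by
  rw [Nat.and_one_is_mod]
  rcases Nat.mod_two_eq_zero_or_one m with h | h <;> simp [Nat.testBit, h]

-- the five category bits of the mask B ORs in for one key
theorem pv_g_bit0 (k : String) :
    ((pvKeyBits.getD k 0 ||| pvMetaBits.getD (PySem.Str.lower k) 0).testBit 0)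
      = decide (k ∈ pvTitleKeys) := by
  rw [pv_keyBits_getD, pv_metaBits_getD]; unfold pvCatMask; exact (pv_mask_bits _ _ _ _ _).1

theorem pv_g_bit1 (k : String) :
    ((pvKeyBits.getD k 0 ||| pvMetaBits.getD (PySem.Str.lower k) 0).testBit 1)
      = decide (k ∈ pvLocKeys) := by
  rw [pv_keyBits_getD, pv_metaBits_getD]; unfold pvCatMask; exact (pv_mask_bits _ _ _ _ _).2.1

theorem pv_g_bit2 (k : String) :
    ((pvKeyBits.getD k 0 ||| pvMetaBits.getD (PySem.Str.lower k) 0).testBit 2)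
      = decide (k ∈ pvIdKeys) := by
  rw [pv_keyBits_getD, pv_metaBits_getD]; unfold pvCatMask; exact (pv_mask_bits _ _ _ _ _).2.2.1

theorem pv_g_bit3 (k : String) :
    ((pvKeyBits.getD k 0 ||| pvMetaBits.getD (PySem.Str.lower k) 0).testBit 3)
      = decide (k ∈ pvUrlKeys) := by
  rw [pv_keyBits_getD, pv_metaBits_getD]; unfold pvCatMask; exact (pv_mask_bits _ _ _ _ _).2.2.2.1

theorem pv_g_bit4 (k : String) :
    ((pvKeyBits.getD k 0 ||| pvMetaBits.getD (PySem.Str.lower k) 0).testBit 4)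
      = decide (PySem.Str.lower k ∈ pvJobSpecificKeys.map PySem.Str.lower) := by
  rw [pv_keyBits_getD, pv_metaBits_getD]; unfold pvCatMask; exact (pv_mask_bits _ _ _ _ _).2.2.2.2

-- ===== VERDICT =====
theorem is_job_object_spec : Claim_equal_is_job_object := by
  intro obj _
  unfold Spec_is_job_object is_job_object is_job_object_alt
  simp only [pv_and_one, Nat.testBit_shiftRight, Nat.add_zero, pv_foldl_or_testBit, Nat.zero_testBit,
    Bool.false_or, pv_g_bit0, pv_g_bit1, pv_g_bit2, pv_g_bit3, pv_g_bit4,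
    pv_bool_inter, pv_contains_ofList, List.any_map, pv_any_ofList, Function.comp_def]
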